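-- pv_equiv track=rewrite | github.com/ESMValGroup/ESMValTool-AR6-OriginalCode-FinalFigures | esmvaltool/diag_scripts/seaice/sie_ipcc_ar6_wg1_fgd_3_18.py | filter_datasets
-- ===== SOURCE A (Python) =====
-- def filter_datasets(data_dict,proj,exp_list=['historical']):
--
--     proj_dict = {}
--
--     for exp in exp_list:
--         exp_dict= {}
--         for filename in sorted(data_dict):
--             if (data_dict[filename]['project'] == proj) & (data_dict[filename]['exp'] == exp):
--                 exp_dict[filename] = data_dict[filename]
--         proj_dict[exp] = exp_dict
--
--     # maybe add here an error message if the len(rcps and hist is not the same )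
--     return (proj_dict)
-- ===== SOURCE B (Python) =====
-- def filter_datasets(data_dict, proj, exp_list=['historical']):
--     # Single bucketing pass instead of one full scan of sorted(data_dict) per experiment:
--     # pre-seed one bucket per experiment, then route each matching dataset to its bucket.
--     proj_dict = {exp: {} for exp in exp_list}
--     for filename in sorted(data_dict):
--         entry = data_dict[filename]
--         if entry.get('project') == proj:
--             exp = entry.get('exp')
--             if exp in proj_dict:
--                 proj_dict[exp][filename] = entry
--     return proj_dict
-- ===== Notes on version B (the rewrite author's own statement) =====
-- stated objective: simpler
-- what changed: Instead of one full scan of sorted(data_dict) per experiment, B pre-seeds an empty bucket per experiment and makes a single bucketing pass over sorted(data_dict), routing each dataset whose project matches to its experiment's bucket via entry.get lookups.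
import Mathlib
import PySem

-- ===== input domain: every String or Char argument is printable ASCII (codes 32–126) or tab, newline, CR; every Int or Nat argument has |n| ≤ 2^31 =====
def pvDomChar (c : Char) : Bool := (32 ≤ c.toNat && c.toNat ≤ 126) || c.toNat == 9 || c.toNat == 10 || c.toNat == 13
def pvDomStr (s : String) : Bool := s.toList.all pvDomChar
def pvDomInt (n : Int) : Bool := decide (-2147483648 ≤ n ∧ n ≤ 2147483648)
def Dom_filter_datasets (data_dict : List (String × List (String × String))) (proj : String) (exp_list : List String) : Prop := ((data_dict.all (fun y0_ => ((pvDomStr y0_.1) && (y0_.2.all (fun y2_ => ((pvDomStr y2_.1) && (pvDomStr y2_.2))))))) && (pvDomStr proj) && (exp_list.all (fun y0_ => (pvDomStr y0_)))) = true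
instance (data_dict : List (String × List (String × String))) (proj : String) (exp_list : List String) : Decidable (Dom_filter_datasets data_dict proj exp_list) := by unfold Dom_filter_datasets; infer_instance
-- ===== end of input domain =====

-- B replaces A's one-full-scan-of-sorted(data_dict)-per-experiment by pre-seeded buckets
-- and a single bucketing pass over sorted(data_dict); objective: simpler.

-- sorted(data_dict) and data_dict[filename], used literally by both Pythons
def fdKeys (data_dict : List (String × List (String × String))) : List String :=
  PySem.List.sorted (data_dict.map Prod.fst) (fun s => s)

def fdEntry (data_dict : List (String × List (String × String))) (fn : String) : List (String × String) :=
  (PySem.Dict.mk data_dict).getD fn []     -- fn is always a key of data_dict; default unreachable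

-- ===== PORT A =====
-- A's subexpressions data_dict[fn]['project'] / data_dict[fn]['exp']; Python raises KeyError
-- when the key is missing — Pre_ rules that out, so the defaults are unreachable on admitted inputs
def fdProj (data_dict : List (String × List (String × String))) (fn : String) : String :=
  (PySem.Dict.mk (fdEntry data_dict fn)).getD "project" ""

def fdExp (data_dict : List (String × List (String × String))) (fn : String) : String :=
  (PySem.Dict.mk (fdEntry data_dict fn)).getD "exp" ""

-- the body of A's inner loop:  if (dd[fn]['project'] == proj) & (dd[fn]['exp'] == exp): exp_dict[fn] = dd[fn]
def fdAStep (data_dict : List (String × List (String × String))) (proj e : String)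
    (ed : PySem.Dict String (List (String × String))) (fn : String) :
    PySem.Dict String (List (String × String)) :=
  if (fdProj data_dict fn == proj) && (fdExp data_dict fn == e)
  then ed.insert fn (fdEntry data_dict fn) else ed

def filter_datasets (data_dict : List (String × List (String × String))) (proj : String) (exp_list : List String) : List (String × List (String × List (String × String))) :=
  (exp_list.foldl
    (fun pd exp =>
      pd.insert exp ((fdKeys data_dict).foldl (fdAStep data_dict proj exp) PySem.Dict.empty).items)
    PySem.Dict.empty).items

-- ===== PORT B =====
-- the body of B's single pass:  entry = dd[fn]; if entry.get('project') == proj: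
--   exp = entry.get('exp');  if exp in proj_dict: proj_dict[exp][fn] = entry
-- (.get returns None when the key is missing; None == proj and None in proj_dict are False
--  since proj and the bucket keys are strings — ported as the Option match below)
def fdBStep (data_dict : List (String × List (String × String))) (proj : String)
    (pd : PySem.Dict String (PySem.Dict String (List (String × String)))) (fn : String) :
    PySem.Dict String (PySem.Dict String (List (String × String))) :=
  if (PySem.Dict.mk (fdEntry data_dict fn)).get? "project" == some proj then
    match (PySem.Dict.mk (fdEntry data_dict fn)).get? "exp" with
    | some e =>
        if pd.contains e
        then pd.modify e PySem.Dict.empty (fun d => d.insert fn (fdEntry data_dict fn))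
        else pd
    | none => pd
  else pd

def filter_datasets_alt (data_dict : List (String × List (String × String))) (proj : String) (exp_list : List String) : List (String × List (String × List (String × String))) :=
  -- initial accumulator: proj_dict = {exp: {} for exp in exp_list}
  (((fdKeys data_dict).foldl (fdBStep data_dict proj)
      (exp_list.foldl (fun pd exp => pd.insert exp PySem.Dict.empty) PySem.Dict.empty)).items).map
    (fun kv => (kv.1, kv.2.items))

-- ===== PRECONDITION & SPEC =====
-- Pre_ excludes exactly (a) the inputs on which A raises KeyError — an entry missing the key
-- 'project' or 'exp', read because exp_list is nonempty (with exp_list = [] A reads nothing and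
-- both return {}) — and (b) duplicate-key association lists, whose rendering as a Python dict
-- is ambiguous (a real Python dict has unique keys).
def Pre_filter_datasets (data_dict : List (String × List (String × String))) (proj : String) (exp_list : List String) : Prop :=
  exp_list = [] ∨
    ((data_dict.map Prod.fst).Nodup ∧
     ∀ kv ∈ data_dict, (kv.2.map Prod.fst).Nodup ∧
       "project" ∈ kv.2.map Prod.fst ∧ "exp" ∈ kv.2.map Prod.fst)
instance (data_dict : List (String × List (String × String))) (proj : String) (exp_list : List String) : Decidable (Pre_filter_datasets data_dict proj exp_list) := by unfold Pre_filter_datasets; infer_instance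

def pvWitness_filter_datasets : (List (String × List (String × String))) × String × List String :=
  ([("f1", [("project", "CMIP5"), ("exp", "historical")]),
    ("f0", [("project", "CMIP5"), ("exp", "rcp85")])],
   "CMIP5", ["historical", "rcp85"])

def Spec_filter_datasets (data_dict : List (String × List (String × String))) (proj : String) (exp_list : List String) (out : List (String × List (String × List (String × String)))) : Prop := out = filter_datasets_alt data_dict proj exp_list
instance (data_dict : List (String × List (String × String))) (proj : String) (exp_list : List String) (out : List (String × List (String × List (String × String)))) : Decidable (Spec_filter_datasets data_dict proj exp_list out) := by unfold Spec_filter_datasets; infer_instance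

-- ===== CLAIM (what is proved, stated in full; the proofs are below) =====
def Claim_equal_filter_datasets : Prop := ∀ (data_dict : List (String × List (String × String))) (proj : String) (exp_list : List String), Dom_filter_datasets data_dict proj exp_list → Pre_filter_datasets data_dict proj exp_list → Spec_filter_datasets data_dict proj exp_list (filter_datasets data_dict proj exp_list)

-- ===== LEMMAS AND PROOFS =====

-- lookup after a fold of inserts whose value depends only on the key
theorem fd_getD_foldl_insert {V : Type} (g : String → V) (es : List String)
    (d : PySem.Dict String V) (dflt : V) (k : String) :
    (es.foldl (fun d e => d.insert e (g e)) d).getD k dflt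
      = if k ∈ es then g k else d.getD k dflt := by
  induction es generalizing d with
  | nil => simp
  | cons e es ih =>
    simp only [List.foldl_cons, ih, PySem.Dict.getD_insert, List.mem_cons]
    by_cases hes : k ∈ es <;> by_cases hke : k = e <;> simp [hes, hke]

-- a fold of key-dependent inserts from empty, item-wise
theorem fd_foldl_insert_items {V : Type} (g : String → V) (es : List String) (dflt : V) :
    (es.foldl (fun d e => d.insert e (g e)) (PySem.Dict.empty : PySem.Dict String V)).items
      = (PySem.Set.ofList es).map (fun k => (k, g k)) := by
  have hkeys : (es.foldl (fun d e => d.insert e (g e)) (PySem.Dict.empty : PySem.Dict String V)).keys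
      = PySem.Set.ofList es := by
    rw [PySem.Dict.keys_foldl_insert es (fun _ e => g e) PySem.Dict.empty]
    simp [PySem.Set.update_nil_left]
  have hnd : (es.foldl (fun d e => d.insert e (g e)) (PySem.Dict.empty : PySem.Dict String V)).keys.Nodup :=
    PySem.Dict.nodup_keys_foldl_insert es (fun _ e => g e) PySem.Dict.empty PySem.Dict.nodup_keys_empty
  rw [PySem.Dict.items_eq_map_keys _ hnd dflt, hkeys]
  apply List.map_congr_left
  intro k hk
  have hmem : k ∈ es := (PySem.Set.mem_ofList es k).mp hk
  rw [fd_getD_foldl_insert]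
  simp [hmem]

-- B's step leaves the empty bucket dict alone (the exp_list = [] case)
theorem fdBStep_empty (data_dict : List (String × List (String × String))) (proj fn : String) :
    fdBStep data_dict proj PySem.Dict.empty fn = PySem.Dict.empty := by
  unfold fdBStep
  cases hp : (PySem.Dict.mk (fdEntry data_dict fn)).get? "project" == some proj
  · simp
  · cases he : (PySem.Dict.mk (fdEntry data_dict fn)).get? "exp" <;>
      simp [PySem.Dict.contains_empty]


-- the entry facts Pre_ gives for a filename of data_dict: .get finds exactly the []-indexed values
def fdEntryOk (data_dict : List (String × List (String × String))) (fn : String) : Prop :=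
  (PySem.Dict.mk (fdEntry data_dict fn)).get? "project" = some (fdProj data_dict fn) ∧
  (PySem.Dict.mk (fdEntry data_dict fn)).get? "exp" = some (fdExp data_dict fn)

theorem fd_get?_eq_some_getD {V : Type} (d : PySem.Dict String V) (k : String) (dflt : V)
    (h : k ∈ d.keys) : d.get? k = some (d.getD k dflt) := by
  cases hg : d.get? k with
  | none => exact absurd h ((PySem.Dict.get?_eq_none_iff_not_mem_keys d k).mp hg)
  | some v => rw [PySem.Dict.getD_eq_get?_getD, hg]; rfl

-- one step of B's pass, seen item-wise: it applies A's step for key kv.1 to every bucket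
theorem fdBStep_items (data_dict : List (String × List (String × String))) (proj : String)
    (pd : PySem.Dict String (PySem.Dict String (List (String × String))))
    (fn : String) (hnd : pd.keys.Nodup) (hok : fdEntryOk data_dict fn) :
    (fdBStep data_dict proj pd fn).items
      = pd.items.map (fun kv => (kv.1, fdAStep data_dict proj kv.1 kv.2 fn)) := by
  obtain ⟨hpr, hex⟩ := hok
  have self_of_each (h : ∀ kv ∈ pd.items, (fun kv => (kv.1, fdAStep data_dict proj kv.1 kv.2 fn)) kv = id kv) :
      pd.items = pd.items.map (fun kv => (kv.1, fdAStep data_dict proj kv.1 kv.2 fn)) := by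
    have := List.map_congr_left h
    simp only [List.map_id] at this
    exact this.symm
  unfold fdBStep
  simp only [hpr, hex]
  by_cases hp : (fdProj data_dict fn == proj) = true
  · have hpb : (some (fdProj data_dict fn) == some proj) = true := by simpa using hp
    by_cases hc : pd.contains (fdExp data_dict fn) = true
    · simp only [hpb, hc, if_true, PySem.Dict.modify]
      rw [PySem.Dict.items_insert_of_contains _ _ hc]
      apply List.map_congr_left
      rintro ⟨k1, v2⟩ hkv
      by_cases hk : k1 = fdExp data_dict fn
      · subst hk
        have hgd : pd.getD (fdExp data_dict fn) PySem.Dict.empty = v2 :=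
          PySem.Dict.getD_of_mem_items pd hkv hnd _
        simp [fdAStep, hp, hgd]
      · have hbeq : (k1 == fdExp data_dict fn) = false := by simpa using hk
        have hbeq' : (fdExp data_dict fn == k1) = false := by
          simpa using fun h => hk h.symm
        simp [fdAStep, hbeq, hbeq', hp]
    · have hc' : pd.contains (fdExp data_dict fn) = false := by simpa using hc
      simp only [hpb, hc', if_true, Bool.false_eq_true, if_false]
      apply self_of_each
      intro kv hkv
      have hmem : kv.1 ∈ pd.keys := PySem.Dict.mem_keys_of_mem_items pd hkv
      have hne : (fdExp data_dict fn == kv.1) = false := by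
        simp only [beq_eq_false_iff_ne, ne_eq]
        intro h
        rw [h, PySem.Dict.contains_iff_mem_keys] at hc
        exact hc hmem
      simp [fdAStep, hne]
  · have hp' : (fdProj data_dict fn == proj) = false := by simpa using hp
    have hpb : (some (fdProj data_dict fn) == some proj) = false := by simpa using hp'
    simp only [hpb, Bool.false_eq_true, if_false]
    apply self_of_each
    intro kv _
    simp [fdAStep, hp']

-- B's whole pass, item-wise: each bucket kv.1 accumulates exactly A's inner loop for kv.1
theorem fdB_foldl_items (data_dict : List (String × List (String × String))) (proj : String)
    (fns : List String)
    (pd : PySem.Dict String (PySem.Dict String (List (String × String))))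
    (hnd : pd.keys.Nodup) (hok : ∀ fn ∈ fns, fdEntryOk data_dict fn) :
    (fns.foldl (fdBStep data_dict proj) pd).items
      = pd.items.map (fun kv => (kv.1, fns.foldl (fdAStep data_dict proj kv.1) kv.2)) := by
  induction fns generalizing pd with
  | nil => simp
  | cons fn fns ih =>
    have hnd' : (fdBStep data_dict proj pd fn).keys.Nodup := by
      unfold fdBStep
      split
      · split
        · split
          · rename_i hc
            rw [PySem.Dict.modify, PySem.Dict.keys_insert_of_contains _ _ hc]
            exact hnd
          · exact hnd
        · exact hnd
      · exact hnd
    rw [List.foldl_cons, ih _ hnd' (fun f hf => hok f (List.mem_cons_of_mem _ hf)),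
        fdBStep_items data_dict proj pd fn hnd (hok fn (List.mem_cons_self)), List.map_map]
    rfl

-- ===== VERDICT (by name: the statement is the Claim_ definition above) =====
theorem filter_datasets_spec : Claim_equal_filter_datasets := by
  intro data_dict proj exp_list _ hpre
  unfold Spec_filter_datasets filter_datasets filter_datasets_alt
  rcases hpre with hnil | ⟨hndd, hentries⟩
  · -- exp_list = []: A builds nothing, B's skeleton is empty and the pass leaves it empty
    subst hnil
    have hfold : ∀ fns : List String,
        fns.foldl (fdBStep data_dict proj) PySem.Dict.empty = PySem.Dict.empty := by
      intro fns
      induction fns with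
      | nil => rfl
      | cons f fs ih => rw [List.foldl_cons, fdBStep_empty]; exact ih
    simp only [List.foldl_nil, hfold]
    rfl
  · -- exp_list ≠ []: every filename's entry has both keys
    have hok : ∀ fn ∈ fdKeys data_dict, fdEntryOk data_dict fn := by
      intro fn hfn
      have hmemf : fn ∈ data_dict.map Prod.fst := by
        unfold fdKeys at hfn
        exact (PySem.List.mem_sorted (data_dict.map Prod.fst) (fun s => s) false fn).mp hfn
      obtain ⟨kv, hkv, hfst⟩ := List.mem_map.mp hmemf
      have hndk : (PySem.Dict.mk data_dict).keys.Nodup := by simpa using hndd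
      have hitems : (fn, kv.2) ∈ (PySem.Dict.mk data_dict).items := by
        have : kv = (fn, kv.2) := by rw [← hfst]
        rw [← this]
        exact hkv
      have hentry : fdEntry data_dict fn = kv.2 :=
        PySem.Dict.getD_of_mem_items _ hitems hndk []
      obtain ⟨_, hprm, hexm⟩ := hentries kv hkv
      constructor
      · exact fd_get?_eq_some_getD _ _ "" (by simpa [hentry, hfst] using hprm)
      · exact fd_get?_eq_some_getD _ _ "" (by simpa [hentry, hfst] using hexm)
    -- A's side: key-dependent inserts from empty
    rw [fd_foldl_insert_items
          (fun e => ((fdKeys data_dict).foldl (fdAStep data_dict proj e) PySem.Dict.empty).items)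
          exp_list []]
    -- B's side: the skeleton, then the single pass
    have hskel := fd_foldl_insert_items (fun _ => (PySem.Dict.empty : PySem.Dict String (List (String × String)))) exp_list PySem.Dict.empty
    have hnds : (exp_list.foldl (fun pd e => pd.insert e PySem.Dict.empty)
        (PySem.Dict.empty : PySem.Dict String (PySem.Dict String (List (String × String))))).keys.Nodup :=
      PySem.Dict.nodup_keys_foldl_insert exp_list (fun _ _ => PySem.Dict.empty) PySem.Dict.empty
        PySem.Dict.nodup_keys_empty
    rw [fdB_foldl_items data_dict proj (fdKeys data_dict) _ hnds hok, hskel, List.map_map,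
        List.map_map]
    rfl
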